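-- pv_equiv track=rewrite | github.com/rvalla/caltoolsbot | pcs.py | big_interval_vector
-- ===== SOURCE A (Python) =====
-- def big_interval_vector(notes):
-- 	vector = [0,0,0,0,0,0,0,0,0,0,0] #ready to build a big interval vector (11 interval classes)...
-- 	step = 0
-- 	for i in range(len(notes)-1):
-- 		for n in range(step + 1, len(notes)):
-- 			a = notes[n]%12
-- 			b = notes[step]%12
-- 			if a != b:
-- 				vector[(abs(a-b))%12-1] += 1
-- 		step += 1
-- 	return vector
-- ===== SOURCE B (Python) =====
-- def big_interval_vector(notes):
-- 	counts = [0] * 12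
-- 	for x in notes:
-- 		counts[x % 12] += 1
-- 	vector = [0] * 11
-- 	for p in range(12):
-- 		for q in range(p + 1, 12):
-- 			vector[q - p - 1] += counts[p] * counts[q]
-- 	return vector
-- ===== Notes on version B (the rewrite author's own statement) =====
-- stated objective: faster
-- what changed: B replaces A's O(n^2) scan over all note pairs with one O(n) pass bucketing pitch classes mod 12 followed by a constant 12x12 class-pair combination (counts[p]*counts[q] per interval class).
import Mathlib
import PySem

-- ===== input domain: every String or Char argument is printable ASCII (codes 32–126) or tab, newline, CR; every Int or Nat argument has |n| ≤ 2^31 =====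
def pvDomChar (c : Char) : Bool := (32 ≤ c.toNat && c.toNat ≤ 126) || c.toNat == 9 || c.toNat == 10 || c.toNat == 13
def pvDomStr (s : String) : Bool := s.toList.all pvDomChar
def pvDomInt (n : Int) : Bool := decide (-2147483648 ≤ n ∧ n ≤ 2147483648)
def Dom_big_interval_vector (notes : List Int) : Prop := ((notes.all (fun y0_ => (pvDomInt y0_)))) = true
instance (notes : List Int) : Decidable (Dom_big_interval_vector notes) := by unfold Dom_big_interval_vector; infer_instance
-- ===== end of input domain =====

-- B replaces A's O(n^2) loop over all note pairs by one O(n) bucketing pass mod 12 plus a constant 12x12 class-pair combination (objective: faster, asymptotic).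

-- ===== PORT A =====
def big_interval_vector (notes : List Int) : List Int :=
  -- vector = [0,0,0,0,0,0,0,0,0,0,0]; step = 0
  -- for i in range(len(notes)-1): for n in range(step+1, len(notes)): ... ; step += 1
  (((PySem.List.pyRange 0 ((notes.length : Int) - 1) 1).foldl
      (fun (st : List Int × Int) (_i : Int) =>
        let vector :=
          (PySem.List.pyRange (st.2 + 1) (notes.length : Int) 1).foldl
            (fun (vector : List Int) (n : Int) =>
              let a := PySem.Int.mod (PySem.List.pyGetD notes n 0) 12
              let b := PySem.Int.mod (PySem.List.pyGetD notes st.2 0) 12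
              if a ≠ b then
                PySem.List.pySetD vector (PySem.Int.mod |a - b| 12 - 1)
                  (PySem.List.pyGetD vector (PySem.Int.mod |a - b| 12 - 1) 0 + 1)
              else vector)
            st.1
        (vector, st.2 + 1))
      ([0,0,0,0,0,0,0,0,0,0,0], 0)).1)

-- ===== PORT B =====
def big_interval_vector_alt (notes : List Int) : List Int :=
  -- counts = [0]*12; for x in notes: counts[x % 12] += 1
  let counts := notes.foldl
    (fun (c : List Int) (x : Int) =>
      PySem.List.pySetD c (PySem.Int.mod x 12)
        (PySem.List.pyGetD c (PySem.Int.mod x 12) 0 + 1))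
    (List.replicate 12 0)
  -- vector = [0]*11; for p in range(12): for q in range(p+1, 12): vector[q-p-1] += counts[p]*counts[q]
  (PySem.List.pyRange 0 12 1).foldl
    (fun (v : List Int) (p : Int) =>
      (PySem.List.pyRange (p + 1) 12 1).foldl
        (fun (v : List Int) (q : Int) =>
          PySem.List.pySetD v (q - p - 1)
            (PySem.List.pyGetD v (q - p - 1) 0 +
              PySem.List.pyGetD counts p 0 * PySem.List.pyGetD counts q 0))
        v)
    (List.replicate 11 0)

-- ===== PRECONDITION & SPEC =====
def Spec_big_interval_vector (notes : List Int) (out : List Int) : Prop := out = big_interval_vector_alt notes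
instance (notes : List Int) (out : List Int) : Decidable (Spec_big_interval_vector notes out) := by unfold Spec_big_interval_vector; infer_instance

-- ===== CLAIM (what is proved, stated in full; the proofs are below) =====
def Claim_equal_big_interval_vector : Prop := ∀ (notes : List Int), Dom_big_interval_vector notes → Spec_big_interval_vector notes (big_interval_vector notes)

-- ===== LEMMAS AND PROOFS =====

/-- `v[k] += m` at a Nat index (no-op past the end). -/
def pvBump (v : List Int) (k : Nat) (m : Int) : List Int := v.set k (v.getD k 0 + m)

/-- all ordered index pairs i < j of the list, as value pairs. -/
def pvPairs : List Int → List (Int × Int)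
  | [] => []
  | x :: xs => xs.map (fun y => (x, y)) ++ pvPairs xs

/-- the 66 class pairs (p, q), 0 ≤ p < q < 12, in B's loop order. -/
def pvPQ : List (Int × Int) :=
  (PySem.List.pyRange 0 12 1).flatMap (fun p => (PySem.List.pyRange (p + 1) 12 1).map (fun q => (p, q)))

/-- indicator: the pitch classes of the pair z are exactly p and q. -/
def pvMatch (p q : Int) (z : Int × Int) : Int :=
  if (PySem.Int.mod z.1 12 = p ∧ PySem.Int.mod z.2 12 = q) ∨
     (PySem.Int.mod z.1 12 = q ∧ PySem.Int.mod z.2 12 = p) then 1 else 0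

/-- number of notes of pitch class p. -/
def pvCnt (notes : List Int) (p : Int) : Int :=
  (notes.map (fun x => if PySem.Int.mod x 12 = p then (1 : Int) else 0)).sum

/-- B's counts table, in bump form. -/
def pvCounts (notes : List Int) : List Int :=
  notes.foldl (fun c x => pvBump c (PySem.Int.mod x 12).toNat 1) (List.replicate 12 0)

/-- A's per-pair bin: |cls z.1 - cls z.2| - 1. -/
def pvIdx (z : Int × Int) : Nat := (PySem.Int.mod z.1 12 - PySem.Int.mod z.2 12).natAbs - 1

/-- A's per-pair weight: 1 iff the classes differ. -/
def pvW (z : Int × Int) : Int := if PySem.Int.mod z.1 12 ≠ PySem.Int.mod z.2 12 then 1 else 0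

lemma pvBump_length (v : List Int) (k : Nat) (m : Int) : (pvBump v k m).length = v.length := by
  simp [pvBump]

lemma pvBump_zero (v : List Int) (k : Nat) : pvBump v k 0 = v := by
  unfold pvBump
  by_cases h : k < v.length
  · rw [add_zero, List.getD_eq_getElem v 0 h]
    exact List.set_getElem_self h
  · exact List.set_eq_of_length_le (by omega)

lemma pvBump_getD (v : List Int) (k : Nat) (m : Int) (j : Nat) (hj : j < v.length) :
    (pvBump v k m).getD j 0 = v.getD j 0 + (if k = j then m else 0) := by
  unfold pvBump
  by_cases h : k = j
  · subst h
    simp [List.getElem_set_self, hj]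
  · simp [List.getD, List.getElem?_set_ne h, h]

lemma pvFold_length {α : Type} (l : List α) (f : α → Nat) (m : α → Int) (v : List Int) :
    (l.foldl (fun v x => pvBump v (f x) (m x)) v).length = v.length := by
  induction l generalizing v with
  | nil => rfl
  | cons x t ih => simpa [pvBump_length] using ih (pvBump v (f x) (m x))

lemma pvFold_getD {α : Type} (l : List α) (f : α → Nat) (m : α → Int) (v : List Int)
    (j : Nat) (hj : j < v.length) :
    (l.foldl (fun v x => pvBump v (f x) (m x)) v).getD j 0
      = v.getD j 0 + (l.map (fun x => if f x = j then m x else 0)).sum := by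
  induction l generalizing v with
  | nil => simp
  | cons x t ih =>
      simp only [List.foldl_cons, List.map_cons, List.sum_cons]
      rw [ih (pvBump v (f x) (m x)) (by simpa [pvBump_length] using hj),
        pvBump_getD v (f x) (m x) j hj]
      ring

lemma pvGetD_replicate_zero (n j : Nat) : (List.replicate n (0 : Int)).getD j 0 = 0 := by
  simp [List.getD, List.getElem?_replicate]
  split <;> rfl

/-- swap a double list sum. -/
lemma pvSumSwap {α β : Type} (l : List α) (m : List β) (f : α → β → Int) :
    (l.map (fun z => (m.map (fun w => f z w)).sum)).sum
      = (m.map (fun w => (l.map (fun z => f z w)).sum)).sum := by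
  induction l with
  | nil => simp
  | cons x t ih =>
      simp only [List.map_cons, List.sum_cons, ih]
      rw [← PySem.List.sum_map_add_int]

/-- `v[i] += m` at a nonnegative Python index is a bump. -/
lemma pvSetGet_eq_bump (v : List Int) (i : Int) (hi : 0 ≤ i) (m : Int) :
    PySem.List.pySetD v i (PySem.List.pyGetD v i 0 + m) = pvBump v i.toNat m := by
  obtain ⟨n, rfl⟩ := Int.eq_ofNat_of_zero_le hi
  simp [pvBump]

/-- the counter in A's outer state always equals the loop index. -/
lemma pvCounterFold (h : List Int → Int → List Int) :
    ∀ (l : List Int) (v : List Int) (s : Int),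
      (l.foldl (fun st (_ : Int) => (h st.1 st.2, st.2 + 1)) (v, s)).1
        = (PySem.List.pyRange s (s + (l.length : Int)) 1).foldl h v := by
  intro l
  induction l with
  | nil => intro v s; simp [PySem.List.pyRange_one_eq_nil]
  | cons x t ih =>
      intro v s
      have h1 : s + ((x :: t).length : Int) = (s + 1) + (t.length : Int) := by
        simp [List.length_cons]; ring
      conv_rhs => rw [h1, PySem.List.pyRange_one_cons (by omega), List.foldl_cons]
      rw [List.foldl_cons, ih (h v s) (s + 1)]

lemma pvRangeShift (f : List Int → Int → List Int) (m : Int) (v : List Int) :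
    (PySem.List.pyRange 1 (m + 1) 1).foldl f v
      = (PySem.List.pyRange 0 m 1).foldl (fun v i => f v (i + 1)) v := by
  rw [PySem.List.pyRange_one, PySem.List.pyRange_one]
  have h1 : (m + 1 - 1).toNat = (m - 0).toNat := by omega
  rw [h1, List.foldl_map, List.foldl_map]
  congr 1
  funext v k
  congr 1
  ring

/-- A's index-based double loop is the fold over all ordered pairs. -/
lemma pvMainA (g : Int → List Int → Int → List Int) :
    ∀ (notes : List Int) (v : List Int),
      (PySem.List.pyRange 0 ((notes.length : Int) - 1) 1).foldl
        (fun v i => (notes.drop (i.toNat + 1)).foldl (g (PySem.List.pyGetD notes i 0)) v) v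
      = (pvPairs notes).foldl (fun v z => g z.1 v z.2) v := by
  intro notes
  induction notes with
  | nil => intro v; simp [PySem.List.pyRange_one_eq_nil, pvPairs]
  | cons x xs ih =>
      intro v
      have hlen : ((x :: xs).length : Int) - 1 = (xs.length : Int) := by
        simp [List.length_cons]
      rw [hlen, pvPairs, List.foldl_append, List.foldl_map]
      cases xs with
      | nil => simp [PySem.List.pyRange_one_eq_nil, pvPairs]
      | cons y ys =>
          have hpos : (0 : Int) < ((y :: ys).length : Int) := by
            simp [List.length_cons]
          rw [PySem.List.pyRange_one_cons hpos, List.foldl_cons]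
          have hfirst :
              ((x :: y :: ys).drop ((0 : Int).toNat + 1)).foldl
                  (g (PySem.List.pyGetD (x :: y :: ys) 0 0)) v
                = (y :: ys).foldl (fun v yy => g (x, yy).1 v (x, yy).2) v := by
            simp [PySem.List.pyGetD_zero_cons]
          rw [hfirst]
          set v1 := (y :: ys).foldl (fun v yy => g (x, yy).1 v (x, yy).2) v with hv1
          have hm : ((y :: ys).length : Int) = (((y :: ys).length : Int) - 1) + 1 := by ring
          rw [show (0 : Int) + 1 = 1 from rfl, hm, pvRangeShift]
          rw [PySem.List.foldl_congr_mem _ _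
            (fun v i => ((y :: ys).drop (i.toNat + 1)).foldl (g (PySem.List.pyGetD (y :: ys) i 0)) v) _
            (by
              intro acc i hi
              have h0 : 0 ≤ i := (PySem.List.mem_pyRange_one.mp hi).1
              obtain ⟨k, rfl⟩ := Int.eq_ofNat_of_zero_le h0
              have hk1 : ((k : Int) + 1) = ((k + 1 : Nat) : Int) := by push_cast; ring
              rw [hk1]
              simp only [PySem.List.pyGetD_natCast, List.getD_cons_succ, Int.toNat_natCast,
                List.drop_succ_cons])]
          exact ih v1

/-- A's inner-loop body is a bump. -/
lemma pvBodyA (x : Int) (v : List Int) (y : Int) :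
    (if PySem.Int.mod y 12 ≠ PySem.Int.mod x 12 then
       PySem.List.pySetD v (PySem.Int.mod |PySem.Int.mod y 12 - PySem.Int.mod x 12| 12 - 1)
         (PySem.List.pyGetD v (PySem.Int.mod |PySem.Int.mod y 12 - PySem.Int.mod x 12| 12 - 1) 0 + 1)
     else v)
    = pvBump v (pvIdx (x, y)) (pvW (x, y)) := by
  have h12 : (0 : Int) < 12 := by norm_num
  have ha0 := PySem.Int.mod_nonneg y h12
  have ha1 := PySem.Int.mod_lt y h12
  have hb0 := PySem.Int.mod_nonneg x h12
  have hb1 := PySem.Int.mod_lt x h12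
  by_cases h : PySem.Int.mod y 12 = PySem.Int.mod x 12
  · have hw : pvW (x, y) = 0 := by
      simp only [pvW]; rw [if_neg (not_not_intro h.symm)]
    rw [if_neg (not_not_intro h), hw, pvBump_zero]
  · rw [if_pos h]
    have habs : |PySem.Int.mod y 12 - PySem.Int.mod x 12|
        = ((PySem.Int.mod x 12 - PySem.Int.mod y 12).natAbs : Int) := by
      rw [Int.abs_eq_natAbs]; omega
    have hsmall : PySem.Int.mod ((PySem.Int.mod x 12 - PySem.Int.mod y 12).natAbs : Int) 12
        = ((PySem.Int.mod x 12 - PySem.Int.mod y 12).natAbs : Int) := by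
      rw [PySem.Int.mod_eq_emod_of_pos h12, Int.emod_eq_of_lt (by omega) (by omega)]
    rw [habs, hsmall, pvSetGet_eq_bump _ _ (by omega)]
    have hidx : (((PySem.Int.mod x 12 - PySem.Int.mod y 12).natAbs : Int) - 1).toNat
        = pvIdx (x, y) := by
      simp only [pvIdx]; omega
    rw [hidx]
    unfold pvW
    rw [if_pos (show PySem.Int.mod (x, y).1 12 ≠ PySem.Int.mod (x, y).2 12 from fun e => h e.symm)]

/-- A computes the fold of bumps over all ordered pairs. -/
lemma pvA_eq (notes : List Int) :
    big_interval_vector notes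
      = (pvPairs notes).foldl (fun v z => pvBump v (pvIdx z) (pvW z))
          [0,0,0,0,0,0,0,0,0,0,0] := by
  cases notes with
  | nil => rfl
  | cons hd tl =>
  set notes := hd :: tl with hnotes
  have hlen1 : 1 ≤ notes.length := by rw [hnotes]; simp
  have h1 : big_interval_vector notes
      = ((PySem.List.pyRange 0 ((notes.length : Int) - 1) 1).foldl
          (fun (st : List Int × Int) (_i : Int) =>
            ((PySem.List.pyRange (st.2 + 1) (notes.length : Int) 1).foldl
              (fun (vector : List Int) (n : Int) =>
                if PySem.Int.mod (PySem.List.pyGetD notes n 0) 12 ≠ PySem.Int.mod (PySem.List.pyGetD notes st.2 0) 12 then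
                  PySem.List.pySetD vector
                    (PySem.Int.mod |PySem.Int.mod (PySem.List.pyGetD notes n 0) 12 - PySem.Int.mod (PySem.List.pyGetD notes st.2 0) 12| 12 - 1)
                    (PySem.List.pyGetD vector
                      (PySem.Int.mod |PySem.Int.mod (PySem.List.pyGetD notes n 0) 12 - PySem.Int.mod (PySem.List.pyGetD notes st.2 0) 12| 12 - 1) 0 + 1)
                else vector)
              st.1, st.2 + 1))
          ([0,0,0,0,0,0,0,0,0,0,0], 0)).1 := rfl
  rw [h1,
    pvCounterFold
      (fun (v : List Int) (s : Int) =>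
        (PySem.List.pyRange (s + 1) (notes.length : Int) 1).foldl
          (fun (vector : List Int) (n : Int) =>
            if PySem.Int.mod (PySem.List.pyGetD notes n 0) 12 ≠ PySem.Int.mod (PySem.List.pyGetD notes s 0) 12 then
              PySem.List.pySetD vector
                (PySem.Int.mod |PySem.Int.mod (PySem.List.pyGetD notes n 0) 12 - PySem.Int.mod (PySem.List.pyGetD notes s 0) 12| 12 - 1)
                (PySem.List.pyGetD vector
                  (PySem.Int.mod |PySem.Int.mod (PySem.List.pyGetD notes n 0) 12 - PySem.Int.mod (PySem.List.pyGetD notes s 0) 12| 12 - 1) 0 + 1)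
            else vector)
          v)
      (PySem.List.pyRange 0 ((notes.length : Int) - 1) 1) [0,0,0,0,0,0,0,0,0,0,0] 0]
  rw [PySem.List.length_pyRange_one]
  rw [show (0 : Int) + ((((notes.length : Int) - 1 - 0).toNat : Nat) : Int) = (notes.length : Int) - 1 by omega]
  rw [PySem.List.foldl_congr_mem _ _
      (fun (v : List Int) (i : Int) =>
        (notes.drop (i.toNat + 1)).foldl
          (fun acc y => pvBump acc (pvIdx (PySem.List.pyGetD notes i 0, y)) (pvW (PySem.List.pyGetD notes i 0, y))) v) _
      (by
        intro acc i hi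
        have h0 : 0 ≤ i := (PySem.List.mem_pyRange_one.mp hi).1
        rw [PySem.List.foldl_pyRange_pyGetD' notes 0
          (fun (vector : List Int) (y : Int) =>
            if PySem.Int.mod y 12 ≠ PySem.Int.mod (PySem.List.pyGetD notes i 0) 12 then
              PySem.List.pySetD vector
                (PySem.Int.mod |PySem.Int.mod y 12 - PySem.Int.mod (PySem.List.pyGetD notes i 0) 12| 12 - 1)
                (PySem.List.pyGetD vector
                  (PySem.Int.mod |PySem.Int.mod y 12 - PySem.Int.mod (PySem.List.pyGetD notes i 0) 12| 12 - 1) 0 + 1)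
            else vector)
          acc (show (0:Int) ≤ i + 1 by omega)]
        rw [show (i + 1).toNat = i.toNat + 1 by omega]
        apply PySem.List.foldl_congr_mem
        intro acc2 y _
        exact pvBodyA (PySem.List.pyGetD notes i 0) acc2 y)]
  rw [pvMainA (fun x v y => pvBump v (pvIdx (x, y)) (pvW (x, y))) notes]

/-- B computes the fold of bumps over the class pairs. -/
lemma pvB_eq (notes : List Int) :
    big_interval_vector_alt notes
      = pvPQ.foldl (fun v pq => pvBump v ((pq.2 - pq.1 - 1).toNat)
          (PySem.List.pyGetD (pvCounts notes) pq.1 0 * PySem.List.pyGetD (pvCounts notes) pq.2 0))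
          (List.replicate 11 0) := by
  have hc : (notes.foldl
      (fun (c : List Int) (x : Int) =>
        PySem.List.pySetD c (PySem.Int.mod x 12)
          (PySem.List.pyGetD c (PySem.Int.mod x 12) 0 + 1))
      (List.replicate 12 0)) = pvCounts notes := by
    unfold pvCounts
    congr 1
    funext c x
    exact pvSetGet_eq_bump c _ (PySem.Int.mod_nonneg x (by norm_num)) 1
  have h0 : big_interval_vector_alt notes
      = (PySem.List.pyRange 0 12 1).foldl
          (fun (v : List Int) (p : Int) =>
            (PySem.List.pyRange (p + 1) 12 1).foldl
              (fun (v : List Int) (q : Int) =>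
                PySem.List.pySetD v (q - p - 1)
                  (PySem.List.pyGetD v (q - p - 1) 0 +
                    PySem.List.pyGetD (pvCounts notes) p 0 * PySem.List.pyGetD (pvCounts notes) q 0))
              v)
          (List.replicate 11 0) := by
    rw [← hc]; rfl
  rw [h0, pvPQ, List.foldl_flatMap]
  apply PySem.List.foldl_congr_mem
  intro acc p hp
  rw [List.foldl_map]
  apply PySem.List.foldl_congr_mem
  intro acc2 q hq
  have h1 := PySem.List.mem_pyRange_one.mp hp
  have h2 := PySem.List.mem_pyRange_one.mp hq
  exact pvSetGet_eq_bump acc2 (q - p - 1) (by omega) _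

lemma pvPQ_mem {z : Int × Int} (hz : z ∈ pvPQ) : 0 ≤ z.1 ∧ z.1 < z.2 ∧ z.2 < 12 := by
  obtain ⟨p, hp, hq⟩ := List.mem_flatMap.mp hz
  obtain ⟨q, hq1, rfl⟩ := List.mem_map.mp hq
  have h1 := PySem.List.mem_pyRange_one.mp hp
  have h2 := PySem.List.mem_pyRange_one.mp hq1
  exact ⟨h1.1, by omega, by omega⟩

/-- the counts table counts pitch classes. -/
lemma pvCounts_getD (notes : List Int) (p : Int) (h0 : 0 ≤ p) (h1 : p < 12) :
    PySem.List.pyGetD (pvCounts notes) p 0 = pvCnt notes p := by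
  obtain ⟨k, rfl⟩ := Int.eq_ofNat_of_zero_le h0
  rw [PySem.List.pyGetD_natCast]
  unfold pvCounts
  rw [pvFold_getD _ _ _ _ k (by simp; omega), pvGetD_replicate_zero, zero_add]
  unfold pvCnt
  congr 1
  apply List.map_congr_left
  intro x _
  have hm0 := PySem.Int.mod_nonneg x (show (0:Int) < 12 by norm_num)
  by_cases hx : PySem.Int.mod x 12 = (k : Int)
  · rw [if_pos (by omega), if_pos hx]
  · rw [if_neg (by omega), if_neg hx]

set_option maxHeartbeats 2000000 in
set_option maxRecDepth 10000 in
/-- where a pair with classes a ≠ b lands, as a sum over the 66 class pairs. -/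
lemma pvPointNat : ∀ (j : Nat), j < 11 → ∀ (a : Nat), a < 12 → ∀ (b : Nat), b < 12 →
    (if ((a : Int) - (b : Int)).natAbs - 1 = j then (if (a : Int) ≠ (b : Int) then (1 : Int) else 0) else 0)
      = (pvPQ.map (fun pq => if (pq.2 - pq.1 - 1).toNat = j then
          (if ((a : Int) = pq.1 ∧ (b : Int) = pq.2) ∨ ((a : Int) = pq.2 ∧ (b : Int) = pq.1) then (1 : Int) else 0) else 0)).sum := by
  decide

lemma pvPoint (z : Int × Int) (j : Nat) (hj : j < 11) :
    (if pvIdx z = j then pvW z else 0)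
      = (pvPQ.map (fun pq => if (pq.2 - pq.1 - 1).toNat = j then pvMatch pq.1 pq.2 z else 0)).sum := by
  have h12 : (0 : Int) < 12 := by norm_num
  have ha0 := PySem.Int.mod_nonneg z.1 h12
  have ha1 := PySem.Int.mod_lt z.1 h12
  have hb0 := PySem.Int.mod_nonneg z.2 h12
  have hb1 := PySem.Int.mod_lt z.2 h12
  have hcast1 : ((PySem.Int.mod z.1 12).toNat : Int) = PySem.Int.mod z.1 12 := Int.toNat_of_nonneg ha0
  have hcast2 : ((PySem.Int.mod z.2 12).toNat : Int) = PySem.Int.mod z.2 12 := Int.toNat_of_nonneg hb0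
  have := pvPointNat j hj (PySem.Int.mod z.1 12).toNat (by omega) (PySem.Int.mod z.2 12).toNat (by omega)
  rw [hcast1, hcast2] at this
  unfold pvIdx pvW pvMatch
  exact this

/-- counting pairs whose classes are exactly {p, q}, p ≠ q. -/
lemma pvCountPairs (p q : Int) (hpq : p ≠ q) :
    ∀ (notes : List Int), ((pvPairs notes).map (pvMatch p q)).sum = pvCnt notes p * pvCnt notes q := by
  intro notes
  induction notes with
  | nil => simp [pvPairs, pvCnt]
  | cons x xs ih =>
      rw [pvPairs, List.map_append, List.sum_append, List.map_map]
      have hcnt : ∀ r : Int, pvCnt (x :: xs) r = (if PySem.Int.mod x 12 = r then 1 else 0) + pvCnt xs r := by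
        intro r; simp [pvCnt]
      rw [hcnt p, hcnt q, ih]
      by_cases hp : PySem.Int.mod x 12 = p
      · have hq : ¬ PySem.Int.mod x 12 = q := by rw [hp]; exact hpq
        have heq : (pvMatch p q ∘ fun y => (x, y)) = (fun y => if PySem.Int.mod y 12 = q then (1:Int) else 0) := by
          funext y
          simp only [pvMatch, Function.comp]
          by_cases hy : PySem.Int.mod y 12 = q
          · rw [if_pos (Or.inl ⟨hp, hy⟩), if_pos hy]
          · rw [if_neg (by tauto), if_neg hy]
        rw [heq]
        have hs : (xs.map (fun y => if PySem.Int.mod y 12 = q then (1:Int) else 0)).sum = pvCnt xs q := rfl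
        rw [hs, if_pos hp, if_neg hq]
        ring
      · by_cases hq : PySem.Int.mod x 12 = q
        · have heq : (pvMatch p q ∘ fun y => (x, y)) = (fun y => if PySem.Int.mod y 12 = p then (1:Int) else 0) := by
            funext y
            simp only [pvMatch, Function.comp]
            by_cases hy : PySem.Int.mod y 12 = p
            · rw [if_pos (Or.inr ⟨hq, hy⟩), if_pos hy]
            · rw [if_neg (by tauto), if_neg hy]
          rw [heq]
          have hs : (xs.map (fun y => if PySem.Int.mod y 12 = p then (1:Int) else 0)).sum = pvCnt xs p := rfl
          rw [hs, if_neg hp, if_pos hq]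
          ring
        · have heq : (pvMatch p q ∘ fun y => (x, y)) = (fun _ => (0:Int)) := by
            funext y
            simp only [pvMatch, Function.comp]
            rw [if_neg (by tauto)]
          rw [heq, if_neg hp, if_neg hq]
          simp only [List.map_const', List.sum_replicate, smul_zero]
          ring

/-- the combinatorial core: per-bin pair count equals the class-pair product sum. -/
lemma pvKey (notes : List Int) (j : Nat) (hj : j < 11) :
    ((pvPairs notes).map (fun z => if pvIdx z = j then pvW z else 0)).sum
      = (pvPQ.map (fun pq => if (pq.2 - pq.1 - 1).toNat = j then pvCnt notes pq.1 * pvCnt notes pq.2 else 0)).sum := by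
  have h1 : ((pvPairs notes).map (fun z => if pvIdx z = j then pvW z else 0)).sum
      = ((pvPairs notes).map (fun z =>
          (pvPQ.map (fun pq => if (pq.2 - pq.1 - 1).toNat = j then pvMatch pq.1 pq.2 z else 0)).sum)).sum := by
    congr 1
    exact List.map_congr_left (fun z _ => pvPoint z j hj)
  rw [h1, pvSumSwap]
  congr 1
  apply List.map_congr_left
  intro pq hpq
  obtain ⟨hp0, hplt, hq12⟩ := pvPQ_mem hpq
  by_cases hc : (pq.2 - pq.1 - 1).toNat = j
  · simp only [hc, if_true]
    exact pvCountPairs pq.1 pq.2 (by omega) notes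
  · simp only [hc, if_false]
    simp

-- ===== VERDICT (by name: the statement is the Claim_ definition above) =====
theorem big_interval_vector_spec : Claim_equal_big_interval_vector := by
  unfold Claim_equal_big_interval_vector
  intro notes _
  unfold Spec_big_interval_vector
  rw [pvA_eq, pvB_eq]
  have hzeros : ([0,0,0,0,0,0,0,0,0,0,0] : List Int) = List.replicate 11 0 := rfl
  rw [hzeros]
  have hlenA : ((pvPairs notes).foldl (fun v z => pvBump v (pvIdx z) (pvW z))
      (List.replicate 11 0)).length = 11 := by
    rw [pvFold_length]; simp
  have hlenB : (pvPQ.foldl (fun v pq => pvBump v ((pq.2 - pq.1 - 1).toNat)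
      (PySem.List.pyGetD (pvCounts notes) pq.1 0 * PySem.List.pyGetD (pvCounts notes) pq.2 0))
      (List.replicate 11 0)).length = 11 := by
    rw [pvFold_length]; simp
  apply List.ext_getElem (by rw [hlenA, hlenB])
  intro j hj1 hj2
  have hj : j < 11 := by rw [hlenA] at hj1; exact hj1
  rw [← List.getD_eq_getElem _ 0 hj1, ← List.getD_eq_getElem _ 0 hj2]
  rw [pvFold_getD _ _ _ _ j (by simpa using hj), pvFold_getD _ _ _ _ j (by simpa using hj),
    pvGetD_replicate_zero, zero_add, zero_add]
  rw [pvKey notes j hj]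
  refine congrArg List.sum ?_
  apply List.map_congr_left
  intro pq hpq
  obtain ⟨hp0, hplt, hq12⟩ := pvPQ_mem hpq
  rw [pvCounts_getD notes pq.1 (by omega) (by omega),
    pvCounts_getD notes pq.2 (by omega) (by omega)]
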